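-- pv_equiv track=rewrite | github.com/dannymulligan/Project_Euler.net | Prob_196/prob_196.py | is_prime_range
-- ===== SOURCE A (Python) =====
-- def integer_square_root(n):
--     '''Return largest m where m**2 <= n'''
--     m = 1
--     while m**2 <= n:
--         m += 1
--     return m-1
--
-- def is_prime_range(bot, top, prime_table):
--     '''Return a list like prime_table but starting with a defined offset'''
--     assert bot <= top
--     assert top <= (len(prime_table)-1)**2, \
--         "Error: prime_table needs to be bigger, result will cover {} to {}, len(prime_table) = {}, needs to be {}" \
--         .format(bot, top, len(prime_table), integer_square_root(top))
--     offset_prime_table = [1] * (top - bot + 1)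
--
--     # special case for multiples of 2
--     n = bot - (bot % 2)
--     while n <= top:
--         offset_prime_table[n - bot] = 2
--         n += 2
--
--     # iterate through primes >= 3
--     for p in range(3, len(prime_table)):
--         if prime_table[p] != 1:
--             continue  # p is not a prime
--
--         n = bot - (bot % (2*p)) + p  # n = the first odd multiple of p that is >= bot
--         while n <= top:
--             if bot <= n <= top:
--                 offset_prime_table[n - bot] = p
--             n += p*2
--         if p ** 2 > top:
--             break
--
--     return offset_prime_table
-- ===== SOURCE B (Python) =====
-- def is_prime_range(bot, top, prime_table):
--     '''Return a list like prime_table but starting with a defined offset'''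
--     assert bot <= top
--     assert top <= (len(prime_table) - 1) ** 2
--     result = []
--     for n in range(bot, top + 1):
--         v = 2 if n % 2 == 0 else 1
--         for p in range(3, len(prime_table)):
--             if prime_table[p] == 1:
--                 if n % (2 * p) == p:
--                     v = p
--                 if p * p > top:
--                     break
--         result.append(v)
--     return result
-- ===== Notes on version B (the rewrite author's own statement) =====
-- stated objective: simpler
-- what changed: Replaces A's in-place segmented sieve (mutating an offset array by striding over multiples of each table prime) with a direct per-number computation: for each n in [bot, top] start from 2 (even) or 1 and scan the same prime prefix of the table, overwriting with each p satisfying n % (2p) == p, with A's exact break at the first prime with p*p > top.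
-- intended difference: When bot and top are both odd and no scanned prime p (prime_table[p]==1, p from 3 up to and including the first with p*p>top) satisfies top % (2*p) == p, A's even-marking loop starts at bot-1 and its negative index -1 wraps around, leaving a spurious 2 at the last position, i.e. A misreports the odd number top as divisible by 2, while B returns the intended 1 (top survives every marking). — e.g. on is_prime_range(1, 1, []): A returns [2], B returns [1]
import Mathlib
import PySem

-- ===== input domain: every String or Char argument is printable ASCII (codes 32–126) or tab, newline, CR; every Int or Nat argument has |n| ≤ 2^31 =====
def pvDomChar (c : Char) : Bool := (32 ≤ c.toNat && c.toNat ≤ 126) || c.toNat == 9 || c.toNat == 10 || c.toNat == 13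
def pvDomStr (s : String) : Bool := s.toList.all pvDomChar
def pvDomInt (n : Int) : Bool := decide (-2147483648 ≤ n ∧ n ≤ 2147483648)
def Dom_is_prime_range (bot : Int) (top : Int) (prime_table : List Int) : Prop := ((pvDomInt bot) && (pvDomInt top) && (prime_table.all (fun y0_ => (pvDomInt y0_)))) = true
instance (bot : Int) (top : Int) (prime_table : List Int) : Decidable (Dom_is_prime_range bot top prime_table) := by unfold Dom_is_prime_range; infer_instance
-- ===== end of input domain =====

-- B replaces A's in-place sieve marking by per-number trial scanning of the same prime prefix (objective: simpler);
-- on odd bot with odd undivided top A's wrapped index -1 leaves a spurious 2 at the last slot, where B returns the intended 1 (see D_).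

-- ===== PORT A =====
-- 'while n <= top: offset[n - bot] = 2; n += 2'  (the Python index n - bot can be -1 on the first
-- iteration when bot is odd; pySetD reproduces Python's negative-index write).  The Nat fuel
-- argument of each loop below is only a structural termination bound; the loop's own exit
-- condition is the Python one and the wrapper passes enough fuel for every input.
def pvMarkEvenAux (bot top : Int) : Nat → Int → List Int → List Int
  | 0, _, l => l
  | fuel + 1, n, l =>
    if n ≤ top then pvMarkEvenAux bot top fuel (n + 2) (PySem.List.pySetD l (n - bot) 2) else l

def pvMarkEven (bot top : Int) (n : Int) (l : List Int) : List Int :=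
  pvMarkEvenAux bot top (top + 2 - n).toNat n l

-- inner 'while n <= top' loop for prime p
def pvMarkOddAux (bot top p : Int) : Nat → Int → List Int → List Int
  | 0, _, l => l
  | fuel + 1, n, l =>
    if n ≤ top then
      pvMarkOddAux bot top p fuel (n + p * 2)
        (if bot ≤ n ∧ n ≤ top then PySem.List.pySetD l (n - bot) p else l)
    else l

def pvMarkOdd (bot top p : Int) (n : Int) (l : List Int) : List Int :=
  pvMarkOddAux bot top p (top + 1 - n).toNat n l

-- 'for p in range(3, len(prime_table))' with continue / break, as recursion on the index p
def pvPrimeLoopAAux (bot top : Int) (table : List Int) : Nat → Nat → List Int → List Int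
  | 0, _, l => l
  | fuel + 1, p, l =>
    if p < table.length then
      if PySem.List.pyGetD table (p : Int) 0 ≠ 1 then
        pvPrimeLoopAAux bot top table fuel (p + 1) l
      else
        let l' := pvMarkOdd bot top (p : Int)
          (bot - PySem.Int.mod bot (2 * (p : Int)) + (p : Int)) l
        if (p : Int) ^ 2 > top then l' else pvPrimeLoopAAux bot top table fuel (p + 1) l'
    else l

def pvPrimeLoopA (bot top : Int) (table : List Int) (p : Nat) (l : List Int) : List Int :=
  pvPrimeLoopAAux bot top table (table.length - p) p l

-- the two asserts raise exactly outside Pre_is_prime_range below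
def is_prime_range (bot : Int) (top : Int) (prime_table : List Int) : List Int :=
  let offset := List.replicate (top - bot + 1).toNat (1 : Int)
  let offset := pvMarkEven bot top (bot - PySem.Int.mod bot 2) offset
  pvPrimeLoopA bot top prime_table 3 offset

-- ===== PORT B =====
-- B's inner 'for p in range(3, len(prime_table))' scan over one number n, with the same break
def pvTrialLoopAux (top : Int) (table : List Int) (n : Int) : Nat → Nat → Int → Int
  | 0, _, v => v
  | fuel + 1, p, v =>
    if p < table.length then
      if PySem.List.pyGetD table (p : Int) 0 = 1 then
        let v' := if PySem.Int.mod n (2 * (p : Int)) = (p : Int) then (p : Int) else v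
        if (p : Int) ^ 2 > top then v' else pvTrialLoopAux top table n fuel (p + 1) v'
      else pvTrialLoopAux top table n fuel (p + 1) v
    else v

def pvTrialLoop (top : Int) (table : List Int) (n : Int) (p : Nat) (v : Int) : Int :=
  pvTrialLoopAux top table n (table.length - p) p v

def is_prime_range_alt (bot : Int) (top : Int) (prime_table : List Int) : List Int :=
  (PySem.List.pyRange bot (top + 1) 1).map fun n =>
    pvTrialLoop top prime_table n 3 (if PySem.Int.mod n 2 = 0 then 2 else 1)

-- ===== PRECONDITION & SPEC =====
-- exactly the two asserts of A; outside them A raises AssertionError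
def Pre_is_prime_range (bot : Int) (top : Int) (prime_table : List Int) : Prop :=
  bot ≤ top ∧ top ≤ ((prime_table.length : Int) - 1) ^ 2
instance (bot : Int) (top : Int) (prime_table : List Int) : Decidable (Pre_is_prime_range bot top prime_table) := by
  unfold Pre_is_prime_range; infer_instance
def pvWitness_is_prime_range : Int × Int × List Int := (0, 1, [0, 0])

-- When bot and top are both odd and no scanned prime p (prime_table[p]==1, p from 3 up to the first prime with
-- p*p>top) satisfies top % (2*p) == p, A's even loop starts at bot-1 and its negative index -1 wraps around,
-- leaving a spurious 2 at the last position (the odd number top); B returns the intended 1 there.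
def D_is_prime_range (bot : Int) (top : Int) (prime_table : List Int) : Prop :=
  bot % 2 = 1 ∧ top % 2 = 1 ∧
  ∀ p, p < prime_table.length → 3 ≤ p → prime_table.getD p 0 = 1 →
    (∃ q, q < p ∧ 3 ≤ q ∧ prime_table.getD q 0 = 1 ∧ top < (q : Int) ^ 2) ∨ top % (2 * (p : Int)) ≠ p
instance (bot : Int) (top : Int) (prime_table : List Int) : Decidable (D_is_prime_range bot top prime_table) := by
  unfold D_is_prime_range
  exact @instDecidableAnd _ _ inferInstance (@instDecidableAnd _ _ inferInstance (Nat.decidableBallLT _ _))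

def Spec_is_prime_range (bot : Int) (top : Int) (prime_table : List Int) (out : List Int) : Prop :=
  ¬ D_is_prime_range bot top prime_table → out = is_prime_range_alt bot top prime_table
instance (bot : Int) (top : Int) (prime_table : List Int) (out : List Int) : Decidable (Spec_is_prime_range bot top prime_table out) := by
  unfold Spec_is_prime_range; infer_instance

def pvDiffWitness_is_prime_range : Int × Int × List Int := (1, 1, [])
def pvDiffWitnessOut_is_prime_range : (List Int) × (List Int) := ([2], [1])

-- ===== CLAIM (what is proved, stated in full; the proofs are below) =====
def Claim_unchanged_is_prime_range : Prop := ∀ (bot : Int) (top : Int) (prime_table : List Int), Dom_is_prime_range bot top prime_table → Pre_is_prime_range bot top prime_table → Spec_is_prime_range bot top prime_table (is_prime_range bot top prime_table)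
def Claim_changed_is_prime_range : Prop := Dom_is_prime_range (pvDiffWitness_is_prime_range.1) (pvDiffWitness_is_prime_range.2.1) (pvDiffWitness_is_prime_range.2.2) ∧ Pre_is_prime_range (pvDiffWitness_is_prime_range.1) (pvDiffWitness_is_prime_range.2.1) (pvDiffWitness_is_prime_range.2.2) ∧ D_is_prime_range (pvDiffWitness_is_prime_range.1) (pvDiffWitness_is_prime_range.2.1) (pvDiffWitness_is_prime_range.2.2) ∧ is_prime_range (pvDiffWitness_is_prime_range.1) (pvDiffWitness_is_prime_range.2.1) (pvDiffWitness_is_prime_range.2.2) = pvDiffWitnessOut_is_prime_range.1 ∧ is_prime_range_alt (pvDiffWitness_is_prime_range.1) (pvDiffWitness_is_prime_range.2.1) (pvDiffWitness_is_prime_range.2.2) = pvDiffWitnessOut_is_prime_range.2 ∧ pvDiffWitnessOut_is_prime_range.1 ≠ pvDiffWitnessOut_is_prime_range.2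
def Claim_exact_is_prime_range : Prop := ∀ (bot : Int) (top : Int) (prime_table : List Int), Dom_is_prime_range bot top prime_table → Pre_is_prime_range bot top prime_table → D_is_prime_range bot top prime_table → is_prime_range bot top prime_table ≠ is_prime_range_alt bot top prime_table

-- ===== LEMMAS AND PROOFS =====

theorem length_markEvenAux (bot top : Int) : ∀ (fuel : Nat) (n : Int) (l : List Int),
    (pvMarkEvenAux bot top fuel n l).length = l.length := by
  intro fuel
  induction fuel with
  | zero => intro n l; rfl
  | succ f IH =>
    intro n l
    simp only [pvMarkEvenAux]
    split
    · rw [IH, PySem.List.length_pySetD]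
    · rfl

theorem length_markEven (bot top : Int) : ∀ (n : Int) (l : List Int),
    (pvMarkEven bot top n l).length = l.length := by
  intro n l
  exact length_markEvenAux bot top _ n l

theorem length_markOddAux (bot top p : Int) : ∀ (fuel : Nat) (n : Int) (l : List Int),
    (pvMarkOddAux bot top p fuel n l).length = l.length := by
  intro fuel
  induction fuel with
  | zero => intro n l; rfl
  | succ f IH =>
    intro n l
    simp only [pvMarkOddAux]
    split
    · rw [IH]
      split
      · rw [PySem.List.length_pySetD]
      · rfl
    · rfl

theorem length_markOdd (bot top p : Int) : ∀ (n : Int) (l : List Int),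
    (pvMarkOdd bot top p n l).length = l.length := by
  intro n l
  exact length_markOddAux bot top p _ n l

theorem length_primeLoopAAux (bot top : Int) (table : List Int) : ∀ (fuel : Nat) (p : Nat) (l : List Int),
    (pvPrimeLoopAAux bot top table fuel p l).length = l.length := by
  intro fuel
  induction fuel with
  | zero => intro p l; rfl
  | succ f IH =>
    intro p l
    simp only [pvPrimeLoopAAux]
    split
    · split
      · rw [IH]
      · split
        · rw [length_markOdd]
        · rw [IH, length_markOdd]
    · rfl

theorem length_primeLoopA (bot top : Int) (table : List Int) : ∀ (p : Nat) (l : List Int),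
    (pvPrimeLoopA bot top table p l).length = l.length := by
  intro p l
  exact length_primeLoopAAux bot top table _ p l

theorem markEvenAux_getElem? (bot top : Int) : ∀ (fuel : Nat) (n : Int) (l : List Int),
    (top + 2 - n).toNat ≤ fuel → bot ≤ n →
    l.length = (top - bot + 1).toNat → ∀ i : Nat,
    (pvMarkEvenAux bot top fuel n l)[i]? =
      if n ≤ bot + (i : Int) ∧ bot + (i : Int) ≤ top ∧ (bot + (i : Int) - n) % 2 = 0
      then some 2 else l[i]? := by
  intro fuel
  induction fuel with
  | zero =>
    intro n l hf hbn hlen i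
    rw [if_neg (by omega)]
    rfl
  | succ f IH =>
    intro n l hf hbn hlen i
    simp only [pvMarkEvenAux]
    split
    · rename_i hnt
      rw [IH (n + 2) _ (by omega) (by omega) (by rw [PySem.List.length_pySetD]; exact hlen) i]
      rw [PySem.List.pySetD_of_nonneg _ _ (by omega), List.getElem?_set]
      have hnb : ((n - bot).toNat : Int) = n - bot := by omega
      split_ifs <;> first | rfl | omega
    · rename_i hnt
      rw [if_neg (by omega)]

theorem markEven_getElem? (bot top : Int) : ∀ (n : Int) (l : List Int), bot ≤ n →
    l.length = (top - bot + 1).toNat → ∀ i : Nat,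
    (pvMarkEven bot top n l)[i]? =
      if n ≤ bot + (i : Int) ∧ bot + (i : Int) ≤ top ∧ (bot + (i : Int) - n) % 2 = 0
      then some 2 else l[i]? := by
  intro n l hbn hlen i
  exact markEvenAux_getElem? bot top _ n l le_rfl hbn hlen i

theorem markOddAux_getElem? (bot top p : Int) (hp : 0 < p) : ∀ (fuel : Nat) (n : Int) (l : List Int),
    (top + 1 - n).toNat ≤ fuel →
    l.length = (top - bot + 1).toNat → ∀ i : Nat,
    (pvMarkOddAux bot top p fuel n l)[i]? =
      if n ≤ bot + (i : Int) ∧ bot + (i : Int) ≤ top ∧ (2 * p) ∣ (bot + (i : Int) - n)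
      then some p else l[i]? := by
  intro fuel
  induction fuel with
  | zero =>
    intro n l hf hlen i
    rw [if_neg (by rintro ⟨h1, h2, -⟩; omega)]
    rfl
  | succ f IH =>
    intro n l hf hlen i
    simp only [pvMarkOddAux]
    split
    · rename_i h
      have hlen2 : (if bot ≤ n ∧ n ≤ top then PySem.List.pySetD l (n - bot) p else l).length = (top - bot + 1).toNat := by
        split
        · rw [PySem.List.length_pySetD]; exact hlen
        · exact hlen
      rw [IH (n + p * 2) _ (by omega) hlen2 i]
      by_cases he : bot + (i : Int) = n
      · rw [if_neg (by rintro ⟨h1, -, -⟩; omega)]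
        rw [if_pos (show bot ≤ n ∧ n ≤ top from ⟨by omega, h⟩)]
        rw [PySem.List.pySetD_of_nonneg _ _ (by omega), List.getElem?_set]
        rw [if_pos (by omega), if_pos (by omega)]
        rw [if_pos ⟨by omega, by omega, by rw [show bot + (i:Int) - n = 0 by omega]; exact dvd_zero _⟩]
      · have hCC : (n + p * 2 ≤ bot + (i : Int) ∧ bot + (i : Int) ≤ top ∧ (2 * p) ∣ (bot + (i : Int) - (n + p * 2)))
            ↔ (n ≤ bot + (i : Int) ∧ bot + (i : Int) ≤ top ∧ (2 * p) ∣ (bot + (i : Int) - n)) := by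
          constructor
          · rintro ⟨h1, h2, h3⟩
            refine ⟨by omega, h2, ?_⟩
            rw [show bot + (i:Int) - n = (bot + (i:Int) - (n + p * 2)) + 2 * p by ring]
            exact dvd_add h3 dvd_rfl
          · rintro ⟨h1, h2, h3⟩
            have hpos : 0 < bot + (i : Int) - n := by omega
            have hle := Int.le_of_dvd hpos h3
            refine ⟨by omega, h2, ?_⟩
            rw [show bot + (i:Int) - (n + p * 2) = (bot + (i:Int) - n) - 2 * p by ring]
            exact dvd_sub h3 dvd_rfl
        rw [if_congr hCC rfl rfl]
        have hl'' : (if bot ≤ n ∧ n ≤ top then PySem.List.pySetD l (n - bot) p else l)[i]? = l[i]? := by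
          split
          · rename_i hg
            rw [PySem.List.pySetD_of_nonneg _ _ (by omega), List.getElem?_set]
            rw [if_neg (by omega)]
          · rfl
        rw [hl'']
    · rename_i h
      rw [if_neg (by rintro ⟨h1, h2, -⟩; omega)]

theorem markOdd_getElem? (bot top p : Int) (hp : 0 < p) : ∀ (n : Int) (l : List Int),
    l.length = (top - bot + 1).toNat → ∀ i : Nat,
    (pvMarkOdd bot top p n l)[i]? =
      if n ≤ bot + (i : Int) ∧ bot + (i : Int) ≤ top ∧ (2 * p) ∣ (bot + (i : Int) - n)
      then some p else l[i]? := by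
  intro n l hlen i
  exact markOddAux_getElem? bot top p hp _ n l le_rfl hlen i

theorem hit_iff (bot top p : Int) (hp : 0 < p) (i : Nat) (hi : bot + (i : Int) ≤ top) :
    (bot - PySem.Int.mod bot (2 * p) + p ≤ bot + (i : Int) ∧ bot + (i : Int) ≤ top ∧
      (2 * p) ∣ (bot + (i : Int) - (bot - PySem.Int.mod bot (2 * p) + p)))
    ↔ PySem.Int.mod (bot + (i : Int)) (2 * p) = p := by
  rw [PySem.Int.mod_eq_emod_of_pos (by omega), PySem.Int.mod_eq_emod_of_pos (by omega)]
  have hr0 : 0 ≤ bot % (2 * p) := Int.emod_nonneg bot (by omega)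
  have hr1 : bot % (2 * p) < 2 * p := Int.emod_lt_of_pos bot (by omega)
  have hdvd : 2 * p ∣ (bot - bot % (2 * p)) :=
    ⟨bot / (2 * p), by have := Int.mul_ediv_add_emod bot (2 * p); omega⟩
  have hps : p % (2 * p) = p := Int.emod_eq_of_lt (le_of_lt hp) (by omega)
  rw [show ((bot + (i:Int)) % (2 * p) = p) ↔ ((bot + (i:Int)) % (2 * p) = p % (2 * p)) by rw [hps]]
  rw [Int.emod_eq_emod_iff_emod_sub_eq_zero, PySem.Int.emod_eq_zero_iff_dvd]
  constructor
  · rintro ⟨h1, h2, h3⟩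
    rw [show bot + (i:Int) - p = (bot + (i:Int) - (bot - bot % (2 * p) + p)) + (bot - bot % (2 * p)) by ring]
    exact dvd_add h3 hdvd
  · intro hd
    have h3 : (2 * p) ∣ (bot + (i:Int) - (bot - bot % (2 * p) + p)) := by
      rw [show bot + (i:Int) - (bot - bot % (2 * p) + p) = (bot + (i:Int) - p) - (bot - bot % (2 * p)) by ring]
      exact dvd_sub hd hdvd
    refine ⟨?_, hi, h3⟩
    by_contra hlt
    rw [not_le] at hlt
    have hpos : 0 < -(bot + (i:Int) - (bot - bot % (2 * p) + p)) := by omega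
    have := Int.le_of_dvd hpos (dvd_neg.mpr h3)
    omega

theorem primeLoopAux_trial (bot top : Int) (table : List Int) : ∀ (fuel : Nat) (p : Nat) (l : List Int) (i : Nat),
    table.length - p ≤ fuel → 3 ≤ p → l.length = (top - bot + 1).toNat → (i : Int) < top - bot + 1 →
    (pvPrimeLoopAAux bot top table fuel p l)[i]? =
      some (pvTrialLoopAux top table (bot + (i : Int)) fuel p (l.getD i 0)) := by
  intro fuel
  induction fuel with
  | zero =>
    intro p l i hf hp3 hlen hi
    have hil : i < l.length := by omega
    show l[i]? = some (l.getD i 0)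
    rw [List.getElem?_eq_getElem hil, List.getD_eq_getElem l 0 hil]
  | succ f IH =>
    intro p l i hf hp3 hlen hi
    have hil : i < l.length := by omega
    have hig : l[i]? = some (l.getD i 0) := by
      rw [List.getElem?_eq_getElem hil, List.getD_eq_getElem l 0 hil]
    have hpz : (0 : Int) < (p : Int) := by exact_mod_cast Nat.lt_of_lt_of_le (by norm_num) hp3
    have hbi : bot + (i : Int) ≤ top := by omega
    simp only [pvPrimeLoopAAux, pvTrialLoopAux]
    by_cases hplen : p < table.length
    · simp only [if_pos hplen, PySem.List.pyGetD_natCast]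
      by_cases hpt : table.getD p 0 = 1
      · simp only [if_pos hpt, if_neg (show ¬ table.getD p 0 ≠ 1 from not_not.mpr hpt)]
        have hml := markOdd_getElem? bot top (p : Int) hpz
          (bot - PySem.Int.mod bot (2 * (p : Int)) + (p : Int)) l hlen i
        simp only [hit_iff bot top (p : Int) hpz i hbi] at hml
        have hml' : (pvMarkOdd bot top (↑p) (bot - PySem.Int.mod bot (2 * ↑p) + ↑p) l).getD i 0
            = if PySem.Int.mod (bot + (i : Int)) (2 * (p : Int)) = (p : Int) then (p : Int) else l.getD i 0 := by
          have hlil : i < (pvMarkOdd bot top (↑p) (bot - PySem.Int.mod bot (2 * ↑p) + ↑p) l).length := by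
            rw [length_markOdd]; exact hil
          rw [List.getD_eq_getElem _ 0 hlil, ← Option.some_inj, ← List.getElem?_eq_getElem hlil, hml, hig]
          split <;> rfl
        by_cases hbrk : (p : Int) ^ 2 > top
        · simp only [if_pos hbrk, hml, hig]
          split <;> rfl
        · simp only [if_neg hbrk]
          rw [IH (p + 1) _ i (by omega) (by omega) (by rw [length_markOdd]; exact hlen) hi]
          rw [hml']
      · simp only [if_neg hpt, if_pos (show table.getD p 0 ≠ 1 from hpt)]
        exact IH (p + 1) l i (by omega) (by omega) hlen hi
    · simp only [if_neg hplen]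
      exact hig

theorem primeLoop_trial (bot top : Int) (table : List Int) : ∀ (p : Nat) (l : List Int) (i : Nat),
    3 ≤ p → l.length = (top - bot + 1).toNat → (i : Int) < top - bot + 1 →
    (pvPrimeLoopA bot top table p l)[i]? = some (pvTrialLoop top table (bot + (i : Int)) p (l.getD i 0)) := by
  intro p l i hp3 hlen hi
  exact primeLoopAux_trial bot top table _ p l i le_rfl hp3 hlen hi

theorem trialAux_indep (top : Int) (table : List Int) (n : Int) : ∀ (fuel : Nat) (p0 : Nat) (v w : Int),
    table.length - p0 ≤ fuel →
    (∃ p : Nat, p0 ≤ p ∧ p < table.length ∧ table.getD p 0 = 1 ∧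
      (∀ q : Nat, p0 ≤ q → q < p → table.getD q 0 = 1 → ¬ top < (q : Int) ^ 2) ∧
      PySem.Int.mod n (2 * (p : Int)) = (p : Int)) →
    pvTrialLoopAux top table n fuel p0 v = pvTrialLoopAux top table n fuel p0 w := by
  intro fuel
  induction fuel with
  | zero =>
    intro p0 v w hf hex
    obtain ⟨p, hge, hlt, -⟩ := hex
    omega
  | succ f IH =>
    intro p0 v w hf hex
    obtain ⟨p, hge, hlt, h1, hnb, hmod⟩ := hex
    simp only [pvTrialLoopAux]
    simp only [if_pos (show p0 < table.length by omega), PySem.List.pyGetD_natCast]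
    by_cases hp0 : table.getD p0 0 = 1
    · simp only [if_pos hp0]
      by_cases hm0 : PySem.Int.mod n (2 * (p0 : Int)) = (p0 : Int)
      · simp only [if_pos hm0]
      · simp only [if_neg hm0]
        have hne : p ≠ p0 := fun h => hm0 (h ▸ hmod)
        split
        · rename_i hbrk
          exact absurd hbrk (hnb p0 le_rfl (by omega) hp0)
        · exact IH (p0+1) v w (by omega)
            ⟨p, by omega, hlt, h1, fun q hq1 hq2 => hnb q (by omega) hq2, hmod⟩
    · simp only [if_neg hp0]
      have hne : p ≠ p0 := fun h => hp0 (h ▸ h1)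
      exact IH (p0+1) v w (by omega)
        ⟨p, by omega, hlt, h1, fun q hq1 hq2 => hnb q (by omega) hq2, hmod⟩

theorem trial_indep (top : Int) (table : List Int) (n : Int) : ∀ (p0 : Nat) (v w : Int),
    (∃ p : Nat, p0 ≤ p ∧ p < table.length ∧ table.getD p 0 = 1 ∧
      (∀ q : Nat, p0 ≤ q → q < p → table.getD q 0 = 1 → ¬ top < (q : Int) ^ 2) ∧
      PySem.Int.mod n (2 * (p : Int)) = (p : Int)) →
    pvTrialLoop top table n p0 v = pvTrialLoop top table n p0 w := by
  intro p0 v w hex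
  exact trialAux_indep top table n _ p0 v w le_rfl hex

theorem trialAux_fix (top : Int) (table : List Int) (n : Int) : ∀ (fuel : Nat) (p0 : Nat) (v : Int),
    (∀ p : Nat, p < table.length → p0 ≤ p → table.getD p 0 = 1 →
      (∃ q : Nat, q < p ∧ p0 ≤ q ∧ table.getD q 0 = 1 ∧ top < (q : Int) ^ 2) ∨
        PySem.Int.mod n (2 * (p : Int)) ≠ (p : Int)) →
    pvTrialLoopAux top table n fuel p0 v = v := by
  intro fuel
  induction fuel with
  | zero => intro p0 v hall; rfl
  | succ f IH =>
    intro p0 v hall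
    simp only [pvTrialLoopAux]
    split
    · rename_i hplen
      rw [PySem.List.pyGetD_natCast]
      by_cases hp0 : table.getD p0 0 = 1
      · rw [if_pos hp0]
        have hmod : PySem.Int.mod n (2 * (p0 : Int)) ≠ (p0 : Int) := by
          rcases hall p0 hplen le_rfl hp0 with ⟨q, hq1, hq2, -, -⟩ | h
          · omega
          · exact h
        simp only [if_neg hmod]
        split
        · rfl
        · rename_i hnbrk
          refine IH (p0+1) v ?_
          intro q hq1 hq2 hq3
          rcases hall q hq1 (by omega) hq3 with ⟨r, hr1, hr2, hr3, hr4⟩ | h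
          · left
            refine ⟨r, hr1, ?_, hr3, hr4⟩
            rcases Nat.eq_or_lt_of_le hr2 with he | hl
            · exact absurd (he ▸ hr4) (by rw [not_lt]; omega)
            · omega
          · right; exact h
      · rw [if_neg hp0]
        refine IH (p0+1) v ?_
        intro q hq1 hq2 hq3
        rcases hall q hq1 (by omega) hq3 with ⟨r, hr1, hr2, hr3, hr4⟩ | h
        · left
          refine ⟨r, hr1, ?_, hr3, hr4⟩
          rcases Nat.eq_or_lt_of_le hr2 with he | hl
          · exact absurd hr3 (he ▸ hp0)
          · omega
        · right; exact h
    · rfl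

theorem trial_fix (top : Int) (table : List Int) (n : Int) : ∀ (p0 : Nat) (v : Int),
    (∀ p : Nat, p < table.length → p0 ≤ p → table.getD p 0 = 1 →
      (∃ q : Nat, q < p ∧ p0 ≤ q ∧ table.getD q 0 = 1 ∧ top < (q : Int) ^ 2) ∨
        PySem.Int.mod n (2 * (p : Int)) ≠ (p : Int)) →
    pvTrialLoop top table n p0 v = v := by
  intro p0 v hall
  exact trialAux_fix top table n _ p0 v hall

theorem pySetD_neg_one_eq_set {l : List Int} (h : l ≠ []) (v : Int) :
    PySem.List.pySetD l (-1) v = l.set (l.length - 1) v := by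
  have hl : 0 < l.length := List.length_pos_iff.mpr h
  simp only [PySem.List.pySetD, PySem.List.pySet?, PySem.List.pyIdx?]
  rw [if_neg (by omega), if_pos (by omega)]
  simp

theorem base_getElem? (bot top : Int) (hbt : bot ≤ top) (i : Nat) (hi : (i : Int) < top - bot + 1) :
    (pvMarkEven bot top (bot - PySem.Int.mod bot 2)
        (List.replicate (top - bot + 1).toNat (1 : Int)))[i]? =
      some (if (bot + (i : Int)) % 2 = 0 then 2
        else if PySem.Int.mod bot 2 = 1 ∧ (i : Int) = top - bot then 2 else 1) := by
  have hmb : PySem.Int.mod bot 2 = bot % 2 := PySem.Int.mod_eq_emod_of_pos (by norm_num)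
  have hrep : (List.replicate (top - bot + 1).toNat (1 : Int)).length = (top - bot + 1).toNat :=
    List.length_replicate
  rcases PySem.Int.mod_two_eq bot with h0 | h1
  · have hb2 : bot % 2 = 0 := by rw [← hmb]; exact h0
    rw [h0, sub_zero]
    rw [markEven_getElem? bot top bot _ le_rfl hrep i]
    rw [List.getElem?_replicate, if_pos (show i < (top - bot + 1).toNat by omega)]
    split_ifs <;> first | rfl | omega
  · have hb2 : bot % 2 = 1 := by rw [← hmb]; exact h1
    rw [h1]
    rw [pvMarkEven, show (top + 2 - (bot - 1)).toNat = (top + 2 - (bot + 1)).toNat + 2 by omega]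
    rw [show pvMarkEvenAux bot top ((top + 2 - (bot + 1)).toNat + 2) (bot - 1)
          (List.replicate (top - bot + 1).toNat (1 : Int)) =
        if bot - 1 ≤ top then
          pvMarkEvenAux bot top ((top + 2 - (bot + 1)).toNat + 1) ((bot - 1) + 2)
            (PySem.List.pySetD (List.replicate (top - bot + 1).toNat (1 : Int)) ((bot - 1) - bot) 2)
        else List.replicate (top - bot + 1).toNat (1 : Int) from rfl]
    rw [if_pos (show bot - 1 ≤ top by omega)]
    rw [show bot - 1 - bot = (-1 : Int) by ring]
    have hne : List.replicate (top - bot + 1).toNat (1 : Int) ≠ [] := by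
      apply List.length_pos_iff.mp
      rw [hrep]; omega
    rw [pySetD_neg_one_eq_set hne]
    rw [show bot - 1 + 2 = bot + 1 by ring]
    rw [markEvenAux_getElem? bot top _ (bot + 1) _ (by omega) (by omega)
      (by rw [List.length_set, hrep]) i]
    rw [List.getElem?_set, hrep, List.getElem?_replicate]
    split_ifs <;> first | rfl | omega

theorem alt_getElem? (bot top : Int) (table : List Int) (i : Nat) (hi : (i : Int) < top - bot + 1) :
    (is_prime_range_alt bot top table)[i]? =
      some (pvTrialLoop top table (bot + (i : Int)) 3
        (if PySem.Int.mod (bot + (i : Int)) 2 = 0 then 2 else 1)) := by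
  unfold is_prime_range_alt
  rw [PySem.List.pyRange_one, List.map_map]
  rw [List.getElem?_map, List.getElem?_range (by omega : i < (top + 1 - bot).toNat)]
  rfl

-- ===== VERDICT (by name: the statement is the Claim_ definition above) =====
theorem is_prime_range_spec : Claim_unchanged_is_prime_range := by
  intro bot top table hdom hpre hnd
  obtain ⟨hbt, -⟩ := hpre
  apply List.ext_getElem?
  intro i
  rw [show is_prime_range bot top table = pvPrimeLoopA bot top table 3
    (pvMarkEven bot top (bot - PySem.Int.mod bot 2)
      (List.replicate (top - bot + 1).toNat (1 : Int))) from rfl]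
  have hblen : (pvMarkEven bot top (bot - PySem.Int.mod bot 2)
      (List.replicate (top - bot + 1).toNat (1 : Int))).length = (top - bot + 1).toNat := by
    rw [length_markEven, List.length_replicate]
  by_cases hi : (i : Int) < top - bot + 1
  · rw [primeLoop_trial bot top table 3 _ i (by norm_num) hblen hi]
    rw [alt_getElem? bot top table i hi]
    have hil : i < (pvMarkEven bot top (bot - PySem.Int.mod bot 2)
        (List.replicate (top - bot + 1).toNat (1 : Int))).length := by rw [hblen]; omega
    have hbb : (pvMarkEven bot top (bot - PySem.Int.mod bot 2)
        (List.replicate (top - bot + 1).toNat (1 : Int))).getD i 0 =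
        (if (bot + (i : Int)) % 2 = 0 then 2
          else if PySem.Int.mod bot 2 = 1 ∧ (i : Int) = top - bot then 2 else 1) := by
      rw [List.getD_eq_getElem _ 0 hil, ← Option.some_inj, ← List.getElem?_eq_getElem hil]
      exact base_getElem? bot top hbt i hi
    rw [hbb]
    have hm2 : PySem.Int.mod (bot + (i : Int)) 2 = (bot + (i : Int)) % 2 :=
      PySem.Int.mod_eq_emod_of_pos (by norm_num)
    by_cases hpar : (bot + (i : Int)) % 2 = 0
    · rw [if_pos hpar, if_pos (show PySem.Int.mod (bot + (i : Int)) 2 = 0 from by rw [hm2]; exact hpar)]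
    · rw [if_neg hpar, if_neg (show ¬ PySem.Int.mod (bot + (i : Int)) 2 = 0 from by rw [hm2]; exact hpar)]
      by_cases hc : PySem.Int.mod bot 2 = 1 ∧ (i : Int) = top - bot
      · rw [if_pos hc]
        have htop : bot + (i : Int) = top := by omega
        have hmb : PySem.Int.mod bot 2 = bot % 2 := PySem.Int.mod_eq_emod_of_pos (by norm_num)
        have h3 : ¬ ∀ p : Nat, p < table.length → 3 ≤ p → table.getD p 0 = 1 →
            (∃ q, q < p ∧ 3 ≤ q ∧ table.getD q 0 = 1 ∧ top < (q : Int) ^ 2) ∨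
              top % (2 * (p : Int)) ≠ (p : Int) :=
          fun hall => hnd ⟨by rw [← hmb]; exact hc.1, by omega, hall⟩
        rw [htop]
        congr 1
        obtain ⟨p, hp⟩ := not_forall.mp h3
        rw [Classical.not_imp, Classical.not_imp, Classical.not_imp, not_or, not_not] at hp
        obtain ⟨hp1, hp2, hp3, hp4, hp5⟩ := hp
        have hp5' : PySem.Int.mod top (2 * (p : Int)) = (p : Int) := by
          rw [PySem.Int.mod_eq_emod_of_pos (by omega)]
          exact hp5
        apply trial_indep
        refine ⟨p, hp2, hp1, hp3, ?_, hp5'⟩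
        intro q hq3 hqp hq1 hq
        exact hp4 ⟨q, hqp, hq3, hq1, hq⟩
      · rw [if_neg hc]
  · have hA : (pvPrimeLoopA bot top table 3
        (pvMarkEven bot top (bot - PySem.Int.mod bot 2)
          (List.replicate (top - bot + 1).toNat (1 : Int)))).length ≤ i := by
      rw [length_primeLoopA, hblen]; omega
    have hB : (is_prime_range_alt bot top table).length ≤ i := by
      unfold is_prime_range_alt
      rw [List.length_map, PySem.List.length_pyRange_one]
      omega
    rw [List.getElem?_eq_none hA, List.getElem?_eq_none hB]

theorem is_prime_range_changed : Claim_changed_is_prime_range := by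
  unfold Claim_changed_is_prime_range
  decide

theorem is_prime_range_tight : Claim_exact_is_prime_range := by
  intro bot top table hdom hpre hD heq
  obtain ⟨hbt, -⟩ := hpre
  obtain ⟨hb1, ht1, hall⟩ := hD
  have hmb : PySem.Int.mod bot 2 = bot % 2 := PySem.Int.mod_eq_emod_of_pos (by norm_num)
  have hall' : ∀ p : Nat, p < table.length → 3 ≤ p → table.getD p 0 = 1 →
      (∃ q : Nat, q < p ∧ 3 ≤ q ∧ table.getD q 0 = 1 ∧ top < (q : Int) ^ 2) ∨
        PySem.Int.mod top (2 * (p : Int)) ≠ (p : Int) := by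
    intro p h1 h2 h3
    rcases hall p h1 h2 h3 with h | h
    · exact Or.inl h
    · right
      rw [PySem.Int.mod_eq_emod_of_pos (by omega)]
      exact h
  set i : Nat := (top - bot).toNat with hidef
  have hic : (i : Int) = top - bot := by omega
  have hi : (i : Int) < top - bot + 1 := by omega
  have htop : bot + (i : Int) = top := by omega
  have e1 := congrArg (fun l => l[i]?) heq
  simp only at e1
  rw [show is_prime_range bot top table = pvPrimeLoopA bot top table 3
    (pvMarkEven bot top (bot - PySem.Int.mod bot 2)
      (List.replicate (top - bot + 1).toNat (1 : Int))) from rfl] at e1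
  have hblen : (pvMarkEven bot top (bot - PySem.Int.mod bot 2)
      (List.replicate (top - bot + 1).toNat (1 : Int))).length = (top - bot + 1).toNat := by
    rw [length_markEven, List.length_replicate]
  rw [primeLoop_trial bot top table 3 _ i (by norm_num) hblen hi] at e1
  rw [alt_getElem? bot top table i hi] at e1
  have hil : i < (pvMarkEven bot top (bot - PySem.Int.mod bot 2)
      (List.replicate (top - bot + 1).toNat (1 : Int))).length := by rw [hblen]; omega
  have hbb : (pvMarkEven bot top (bot - PySem.Int.mod bot 2)
      (List.replicate (top - bot + 1).toNat (1 : Int))).getD i 0 = 2 := by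
    rw [List.getD_eq_getElem _ 0 hil, ← Option.some_inj, ← List.getElem?_eq_getElem hil]
    rw [base_getElem? bot top hbt i hi]
    rw [if_neg (by omega), if_pos ⟨by rw [hmb]; exact hb1, hic⟩]
  rw [hbb, htop] at e1
  have hmt : PySem.Int.mod top 2 = top % 2 := PySem.Int.mod_eq_emod_of_pos (by norm_num)
  rw [if_neg (show ¬ PySem.Int.mod top 2 = 0 from by rw [hmt]; omega)] at e1
  rw [trial_fix top table top 3 2 hall', trial_fix top table top 3 1 hall'] at e1
  exact absurd (Option.some_inj.mp e1) (by norm_num)
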